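-- pv_equiv track=rewrite | github.com/fangchu-in/morso-website | morso_menu_updater.py | find_section_block
-- ===== SOURCE A (Python) =====
-- def find_section_block(content, html_id):
--     """Find start and end of a section-block div by id."""
--     start_tag = f'<div class="section-block" id="{html_id}">'
--     start = content.find(start_tag)
--     if start == -1:
--         return -1, -1
--     depth = 0
--     i = start
--     while i < len(content):
--         if content[i:i+4] == '<div':
--             depth += 1
--             i += 4
--         elif content[i:i+6] == '</div>':
--             depth -= 1
--             if depth == 0:
--                 end = i + 6
--                 if end < len(content) and content[end] == '\n':
--                     end += 1
--                 return start, end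
--             i += 6
--         else:
--             i += 1
--     return start, -1
-- ===== SOURCE B (Python) =====
-- def find_section_block(content, html_id):
--     """Find start and end of a section-block div by id."""
--     start = content.find(f'<div class="section-block" id="{html_id}">')
--     if start == -1:
--         return -1, -1
--     depth = 0
--     i = start
--     while True:
--         c = content.find('</div>', i)
--         if c == -1:
--             return start, -1
--         o = content.find('<div', i)
--         if o != -1 and o < c:
--             depth += 1
--             i = o + 4
--         else:
--             depth -= 1
--             if depth == 0:
--                 end = c + 6
--                 if end < len(content) and content[end] == '\n':
--                     end += 1
--                 return start, end
--             i = c + 6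
-- ===== Notes on version B (the rewrite author's own statement) =====
-- stated objective: alternative
-- what changed: B replaces A's character-by-character scan (testing a 4/6-char slice at every position) with a jump scan that uses str.find to locate the next '<div' / '</div>' token directly and processes only those token events.
import Mathlib
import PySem

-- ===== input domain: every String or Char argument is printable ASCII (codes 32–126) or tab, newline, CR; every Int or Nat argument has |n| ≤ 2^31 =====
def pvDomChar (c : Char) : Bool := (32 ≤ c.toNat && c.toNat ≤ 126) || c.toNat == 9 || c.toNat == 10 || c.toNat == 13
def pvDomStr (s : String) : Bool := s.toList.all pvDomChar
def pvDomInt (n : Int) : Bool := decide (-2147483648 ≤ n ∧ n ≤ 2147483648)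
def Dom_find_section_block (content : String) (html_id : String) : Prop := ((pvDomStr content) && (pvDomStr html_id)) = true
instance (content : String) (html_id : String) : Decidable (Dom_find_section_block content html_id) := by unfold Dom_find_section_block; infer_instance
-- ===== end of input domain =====

-- B replaces A's char-by-char depth scan with str.find jumps to the next '<div'/'</div>' token; equal return value proved on all inputs.

-- the two token literals '<div' and '</div>'
def pvTag4 : List Char := ['<', 'd', 'i', 'v']
def pvTag6 : List Char := ['<', '/', 'd', 'i', 'v', '>']

-- shared end-of-block adjustment: end = i+6, bumped past one trailing newline (same line in both Pythons)
def pvEnd (cs : List Char) (e : Nat) : Int :=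
  if e < cs.length ∧ cs.getD e ' ' = '\n' then ((e : Int) + 1) else (e : Int)

-- ===== PORT A =====
-- A's while loop: scan one character at a time, testing the 4- and 6-char slices at i
def pvLoopA (cs : List Char) (start : Int) (i : Nat) (depth : Int) : Int × Int :=
  if i < cs.length then
    if PySem.List.slice cs (some (i : Int)) (some ((i : Int) + 4)) = pvTag4 then
      pvLoopA cs start (i + 4) (depth + 1)
    else if PySem.List.slice cs (some (i : Int)) (some ((i : Int) + 6)) = pvTag6 then
      if depth - 1 = 0 then (start, pvEnd cs (i + 6))
      else pvLoopA cs start (i + 6) (depth - 1)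
    else pvLoopA cs start (i + 1) depth
  else (start, -1)
termination_by cs.length - i

def find_section_block (content : String) (html_id : String) : Int × Int :=
  let tag : List Char := "<div class=\"section-block\" id=\"".toList ++ html_id.toList ++ "\">".toList
  let cs := content.toList
  let start := PySem.Chars.find cs tag
  if start = -1 then (-1, -1) else pvLoopA cs start start.toNat 0

-- ===== PORT B =====
-- o = content.find('<div', i) and c = content.find('</div>', i) of Source B
def pvOpenAt (cs : List Char) (i : Nat) : Int := PySem.Chars.findFrom cs pvTag4 (i : Int) none
def pvCloseAt (cs : List Char) (i : Nat) : Int := PySem.Chars.findFrom cs pvTag6 (i : Int) none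

-- a start index past the end finds nothing (needed by the termination argument below)
theorem pvFindFrom_gt (cs t : List Char) (i : Nat) (h : cs.length < i) :
    PySem.Chars.findFrom cs t (i : Int) none = -1 := by
  simp only [PySem.Chars.findFrom]
  have : (cs.length : Int) < (i : Int) := by exact_mod_cast h
  split_ifs with h1 <;> simp_all
  all_goals omega

theorem pvFindFrom_le (cs t : List Char) (i : Nat)
    (h : PySem.Chars.findFrom cs t (i : Int) none ≠ -1) : i ≤ cs.length := by
  by_contra hc
  exact h (pvFindFrom_gt cs t i (by omega))

theorem pvFindFrom_ge (cs t : List Char) (i : Nat)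
    (h : PySem.Chars.findFrom cs t (i : Int) none ≠ -1) :
    (i : Int) ≤ PySem.Chars.findFrom cs t (i : Int) none :=
  (PySem.Chars.findFrom_natCast_spec cs t i (pvFindFrom_le cs t i h) h).1

-- Source B's while-True loop: jump to the next token occurrence instead of stepping by one char
def pvLoopB (cs : List Char) (start : Int) (i : Nat) (depth : Int) : Int × Int :=
  if hc : pvCloseAt cs i = -1 then (start, -1)
  else if ho : pvOpenAt cs i ≠ -1 ∧ pvOpenAt cs i < pvCloseAt cs i then
    pvLoopB cs start ((pvOpenAt cs i).toNat + 4) (depth + 1)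
  else if depth - 1 = 0 then (start, pvEnd cs ((pvCloseAt cs i).toNat + 6))
  else pvLoopB cs start ((pvCloseAt cs i).toNat + 6) (depth - 1)
termination_by cs.length + 1 - i
decreasing_by
  · unfold pvOpenAt pvCloseAt at *
    have h1 := pvFindFrom_ge cs pvTag4 i ho.1
    have h2 := pvFindFrom_le cs pvTag4 i ho.1
    omega
  · unfold pvOpenAt pvCloseAt at *
    have h1 := pvFindFrom_ge cs pvTag6 i hc
    have h2 := pvFindFrom_le cs pvTag6 i hc
    omega

def find_section_block_alt (content : String) (html_id : String) : Int × Int :=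
  let tag : List Char := "<div class=\"section-block\" id=\"".toList ++ html_id.toList ++ "\">".toList
  let cs := content.toList
  let start := PySem.Chars.find cs tag
  if start = -1 then (-1, -1) else pvLoopB cs start start.toNat 0

-- ===== PRECONDITION & SPEC =====
def Spec_find_section_block (content : String) (html_id : String) (out : Int × Int) : Prop := out = find_section_block_alt content html_id
instance (content : String) (html_id : String) (out : Int × Int) : Decidable (Spec_find_section_block content html_id out) := by unfold Spec_find_section_block; infer_instance

-- ===== CLAIM (what is proved, stated in full; the proofs are below) =====
def Claim_equal_find_section_block : Prop := ∀ (content : String) (html_id : String), Dom_find_section_block content html_id → Spec_find_section_block content html_id (find_section_block content html_id)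

-- ===== LEMMAS AND PROOFS =====

-- A's slice test at i is exactly "t is a prefix of cs.drop i"
theorem pvSlice_eq_iff (cs t : List Char) (i n : Nat) (h : t.length = n) :
    (PySem.List.slice cs (some (i : Int)) (some ((i : Int) + (n : Int))) = t) ↔ t <+: cs.drop i := by
  rw [PySem.List.slice_natCast_add]
  constructor
  · intro he; rw [← he]; exact List.take_prefix _ _
  · intro hp
    have := (List.prefix_iff_eq_take.mp hp)
    rw [this, h]

-- if t occurs as a prefix at i, find-from-i returns exactly i
theorem pvFindFrom_at (cs t : List Char) (i : Nat) (hi : i ≤ cs.length)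
    (hp : t <+: cs.drop i) : PySem.Chars.findFrom cs t (i : Int) none = (i : Int) := by
  rw [PySem.Chars.findFrom_natCast cs t i hi]
  have hinf : t <:+: cs.drop i := hp.isInfix
  have h0 : 0 ≤ PySem.Chars.find (cs.drop i) t := (PySem.Chars.find_nonneg_iff _ _).2 hinf
  have hne : PySem.Chars.find (cs.drop i) t ≠ -1 := by omega
  rw [if_neg hne]
  have hz : PySem.Chars.find (cs.drop i) t = 0 := by
    by_contra hnz
    have hpos : 0 < (PySem.Chars.find (cs.drop i) t).toNat := by omega
    have := (PySem.Chars.find_spec h0).2 0 hpos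
    simp at this
    exact this hp
  omega

-- if t does not start at i, find-from-i and find-from-(i+1) agree
theorem pvFindFrom_step (cs t : List Char) (i : Nat) (hi : i < cs.length)
    (hnp : ¬ t <+: cs.drop i) :
    PySem.Chars.findFrom cs t (i : Int) none = PySem.Chars.findFrom cs t ((i : Int) + 1) none := by
  have h1 : ((i : Int) + 1) = (((i + 1 : Nat)) : Int) := by push_cast; ring
  rw [h1, PySem.Chars.findFrom_natCast cs t i (by omega),
      PySem.Chars.findFrom_natCast cs t (i + 1) (by omega)]
  have hdd : cs.drop (i + 1) = (cs.drop i).drop 1 := by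
    rw [List.drop_drop]
  by_cases h2 : PySem.Chars.find (cs.drop i) t = -1
  · have hni : ¬ t <:+: cs.drop i := (PySem.Chars.find_eq_neg_one_iff _ _).mp h2
    have hni2 : PySem.Chars.find (cs.drop (i + 1)) t = -1 := by
      rw [PySem.Chars.find_eq_neg_one_iff]
      intro hinf
      exact hni (hinf.trans (by rw [hdd]; exact (List.drop_suffix 1 (cs.drop i)).isInfix))
    rw [if_pos h2, if_pos hni2]
  · -- t occurs in cs.drop i, at first index r1 ≥ 1
    have hr1nn : 0 ≤ PySem.Chars.find (cs.drop i) t := by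
      have := PySem.Chars.neg_one_le_find (cs.drop i) t; omega
    set r1 := PySem.Chars.find (cs.drop i) t with hr1def
    obtain ⟨hocc1, hmin1⟩ := PySem.Chars.find_spec hr1nn
    have hr1pos : 0 < r1.toNat := by
      rcases Nat.eq_zero_or_pos r1.toNat with h | h
      · exfalso; apply hnp
        rw [show (PySem.Chars.find (cs.drop i) t).toNat = 0 from h, List.drop_zero] at hocc1
        exact hocc1
      · exact h
    -- occurrence of t in cs.drop (i+1) at r1.toNat - 1
    have hocc2 : t <+: (cs.drop (i + 1)).drop (r1.toNat - 1) := by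
      rw [hdd, List.drop_drop]
      rw [show 1 + (r1.toNat - 1) = r1.toNat from by omega]
      exact hocc1
    have hr2nn : 0 ≤ PySem.Chars.find (cs.drop (i + 1)) t := by
      rw [PySem.Chars.find_nonneg_iff]
      exact hocc2.isInfix.trans ((List.drop_suffix _ _).isInfix)
    set r2 := PySem.Chars.find (cs.drop (i + 1)) t with hr2def
    obtain ⟨hocc2', hmin2⟩ := PySem.Chars.find_spec hr2nn
    have hle1 : r2.toNat ≤ r1.toNat - 1 := by
      by_contra hlt
      exact hmin2 (r1.toNat - 1) (by omega) hocc2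
    have hle2 : r1.toNat ≤ r2.toNat + 1 := by
      by_contra hlt
      apply hmin1 (1 + r2.toNat) (by omega)
      have hdl : List.drop (1 + r2.toNat) (List.drop i cs) = List.drop r2.toNat (cs.drop (i + 1)) := by
        rw [List.drop_drop, List.drop_drop]
        congr 1
        omega
      rw [hdl]
      exact hocc2'
    have hr1ne : r1 ≠ -1 := h2
    have hr2ne : r2 ≠ -1 := by omega
    rw [if_neg hr1ne, if_neg hr2ne]
    omega

-- '<div' and '</div>' cannot both start at the same position
theorem pvTags_not_both (l : List Char) (h4 : pvTag4 <+: l) (h6 : pvTag6 <+: l) : False := by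
  have := List.prefix_of_prefix_length_le h4 h6 (by decide)
  revert this; decide

-- if no '</div>' occurs from i on, A's loop returns (start, -1)
theorem pvLoopA_noclose (cs : List Char) (start : Int) :
    ∀ n i depth, cs.length - i ≤ n → ¬ pvTag6 <:+: cs.drop i →
      pvLoopA cs start i depth = (start, -1) := by
  intro n
  induction n with
  | zero =>
    intro i depth hn hno
    rw [pvLoopA]
    rw [if_neg (by omega)]
  | succ m ih =>
    intro i depth hn hno
    rw [pvLoopA]
    by_cases hi : i < cs.length
    · rw [if_pos hi]
      have hsub : ∀ k, ¬ pvTag6 <:+: cs.drop (i + k) := by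
        intro k hinf
        apply hno
        have : cs.drop (i + k) = (cs.drop i).drop k := by rw [List.drop_drop]; try ring_nf
        rw [this] at hinf
        exact hinf.trans (List.drop_suffix k (cs.drop i)).isInfix
      by_cases h4 : PySem.List.slice cs (some (i : Int)) (some ((i : Int) + 4)) = pvTag4
      · rw [if_pos h4]
        exact ih (i + 4) (depth + 1) (by omega) (hsub 4)
      · rw [if_neg h4]
        have h6 : ¬ PySem.List.slice cs (some (i : Int)) (some ((i : Int) + 6)) = pvTag6 := by
          intro h6
          apply hno
          refine ((pvSlice_eq_iff cs pvTag6 i 6 (by decide)).mp ?_).isInfix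
          exact_mod_cast h6
        rw [if_neg h6]
        exact ih (i + 1) depth (by omega) (hsub 1)
    · rw [if_neg hi]

-- past the end both loops return (start, -1)
theorem pvCloseAt_terminal (cs : List Char) (i : Nat) (h : cs.length ≤ i) :
    pvCloseAt cs i = -1 := by
  rcases Nat.lt_or_ge cs.length i with h' | h'
  · exact pvFindFrom_gt cs pvTag6 i h'
  · have hieq : i = cs.length := by omega
    have hfe : PySem.Chars.find (cs.drop cs.length) pvTag6 = -1 := by
      rw [List.drop_length]; decide
    unfold pvCloseAt
    rw [hieq, PySem.Chars.findFrom_natCast cs pvTag6 cs.length (le_refl _), if_pos hfe]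

theorem pvLoop_eq_terminal (cs : List Char) (start : Int) (i : Nat) (depth : Int)
    (h : cs.length ≤ i) : pvLoopA cs start i depth = pvLoopB cs start i depth := by
  rw [pvLoopA, if_neg (by omega), pvLoopB, dif_pos (pvCloseAt_terminal cs i h)]

-- B's loop only looks at the two find results, so equal finds give equal runs
theorem pvLoopB_congr (cs : List Char) (start : Int) (i j : Nat) (depth : Int)
    (h1 : pvOpenAt cs i = pvOpenAt cs j) (h2 : pvCloseAt cs i = pvCloseAt cs j) :
    pvLoopB cs start i depth = pvLoopB cs start j depth := by
  conv_lhs => rw [pvLoopB]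
  conv_rhs => rw [pvLoopB]
  rw [h1, h2]

-- main lemma: the two loops agree from any position
theorem pvLoop_eq (cs : List Char) (start : Int) :
    ∀ n i depth, cs.length + 1 - i ≤ n →
      pvLoopA cs start i depth = pvLoopB cs start i depth := by
  intro n
  induction n with
  | zero => intro i depth hn; exact pvLoop_eq_terminal cs start i depth (by omega)
  | succ m ih =>
    intro i depth hn
    by_cases hi : i < cs.length
    · by_cases hc : pvCloseAt cs i = -1
      · -- no close token from i: both return (start, -1)
        have hno : ¬ pvTag6 <:+: cs.drop i := by
          have := (PySem.Chars.findFrom_natCast_eq_neg_one_iff cs pvTag6 i (by omega)).mp hc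
          exact this
        rw [pvLoopA_noclose cs start (cs.length) i depth (by omega) hno]
        rw [pvLoopB, dif_pos hc]
      · rw [pvLoopA, if_pos hi]
        by_cases h4 : PySem.List.slice cs (some (i : Int)) (some ((i : Int) + 4)) = pvTag4
        · -- '<div' at i: B's open event is exactly i
          have hp4 : pvTag4 <+: cs.drop i := by
            refine (pvSlice_eq_iff cs pvTag4 i 4 (by decide)).mp ?_
            exact_mod_cast h4
          have ho : pvOpenAt cs i = (i : Int) := pvFindFrom_at cs pvTag4 i (by omega) hp4
          have hcge : (i : Int) ≤ pvCloseAt cs i := pvFindFrom_ge cs pvTag6 i hc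
          have hcne : pvCloseAt cs i ≠ (i : Int) := by
            intro he
            have hle : i ≤ cs.length := by omega
            have hspec := (PySem.Chars.findFrom_natCast_spec cs pvTag6 i hle hc).2.1
            have he' : PySem.Chars.findFrom cs pvTag6 (i : Int) none = (i : Int) := he
            rw [he'] at hspec
            simp only [Int.toNat_natCast] at hspec
            exact pvTags_not_both (cs.drop i) hp4 hspec
          rw [if_pos h4]
          rw [pvLoopB, dif_neg hc, dif_pos ⟨by omega, by omega⟩, ho]
          simp only [Int.toNat_natCast]
          exact ih (i + 4) (depth + 1) (by omega)
        · rw [if_neg h4]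
          have hnp4 : ¬ pvTag4 <+: cs.drop i := fun hp => by
            refine h4 ?_
            have := (pvSlice_eq_iff cs pvTag4 i 4 (by decide)).mpr hp
            exact_mod_cast this
          by_cases h6 : PySem.List.slice cs (some (i : Int)) (some ((i : Int) + 6)) = pvTag6
          · -- '</div>' at i: B's close event is exactly i, and the open event (if any) is ≥ i
            have hp6 : pvTag6 <+: cs.drop i := by
              refine (pvSlice_eq_iff cs pvTag6 i 6 (by decide)).mp ?_
              exact_mod_cast h6
            have hcl : pvCloseAt cs i = (i : Int) := pvFindFrom_at cs pvTag6 i (by omega) hp6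
            have hno : ¬ (pvOpenAt cs i ≠ -1 ∧ pvOpenAt cs i < pvCloseAt cs i) := by
              rintro ⟨hone, holt⟩
              have hoge : (i : Int) ≤ pvOpenAt cs i := pvFindFrom_ge cs pvTag4 i hone
              omega
            rw [if_pos h6]
            rw [pvLoopB, dif_neg hc, dif_neg hno, hcl]
            simp only [Int.toNat_natCast]
            by_cases hd : depth - 1 = 0
            · rw [if_pos hd, if_pos hd]
            · rw [if_neg hd, if_neg hd]
              exact ih (i + 6) (depth - 1) (by omega)
          · -- no token at i: B's finds are unchanged from i to i+1
            have hnp6 : ¬ pvTag6 <+: cs.drop i := fun hp => by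
              refine h6 ?_
              have := (pvSlice_eq_iff cs pvTag6 i 6 (by decide)).mpr hp
              exact_mod_cast this
            have ho : pvOpenAt cs i = pvOpenAt cs (i + 1) := by
              unfold pvOpenAt
              rw [pvFindFrom_step cs pvTag4 i hi hnp4]
              norm_cast
            have hc' : pvCloseAt cs i = pvCloseAt cs (i + 1) := by
              unfold pvCloseAt
              rw [pvFindFrom_step cs pvTag6 i hi hnp6]
              norm_cast
            rw [if_neg h6]
            rw [ih (i + 1) depth (by omega)]
            exact pvLoopB_congr cs start (i + 1) i depth ho.symm hc'.symm
    · -- i ≥ length: both terminate with (start, -1)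
      exact pvLoop_eq_terminal cs start i depth (by omega)

-- ===== VERDICT (by name: the statement is the Claim_ definition above) =====
theorem find_section_block_spec : Claim_equal_find_section_block := by
  intro content html_id _
  unfold Spec_find_section_block find_section_block find_section_block_alt
  dsimp only
  by_cases hs : PySem.Chars.find content.toList ("<div class=\"section-block\" id=\"".toList ++ html_id.toList ++ "\">".toList) = -1
  · rw [if_pos hs, if_pos hs]
  · rw [if_neg hs, if_neg hs]
    exact pvLoop_eq content.toList _ (content.toList.length + 1) _ 0 (by omega)
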